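-- pv_equiv track=rewrite | github.com/VladislavMaks/-Python | lesson_5.py | isdig
-- ===== SOURCE A (Python) =====
-- def isdig(string):
--     """
--     Функция ищет числа в строке и возвращает список чисел в ней, преобразуя числа в класс int
--     """
--     str_list = string.split()
--     num_list = []
--     for item in str_list:
--         a = list(item)
--         num = ''
--         for i in a:
--             if i.isdigit():
--                 num += i
--         if num != '':
--             num_list.append(int(num))
--     return num_list
-- ===== SOURCE B (Python) =====
-- def isdig(string):
--     """Single-pass scan: collect digits into a buffer, flush the buffer on whitespace."""
--     num_list = []
--     num = ''
--     for c in string: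
--         if c.isdigit():
--             num += c
--         elif c.isspace():
--             if num != '':
--                 num_list.append(int(num))
--             num = ''
--     if num != '':
--         num_list.append(int(num))
--     return num_list
-- ===== Notes on version B (the rewrite author's own statement) =====
-- stated objective: simpler
-- what changed: Replaces split()-then-per-token-filter (which materialises a token list and rescans each token) with a single character scan that keeps one digit buffer and flushes it at whitespace and at end of string.
import Mathlib
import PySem

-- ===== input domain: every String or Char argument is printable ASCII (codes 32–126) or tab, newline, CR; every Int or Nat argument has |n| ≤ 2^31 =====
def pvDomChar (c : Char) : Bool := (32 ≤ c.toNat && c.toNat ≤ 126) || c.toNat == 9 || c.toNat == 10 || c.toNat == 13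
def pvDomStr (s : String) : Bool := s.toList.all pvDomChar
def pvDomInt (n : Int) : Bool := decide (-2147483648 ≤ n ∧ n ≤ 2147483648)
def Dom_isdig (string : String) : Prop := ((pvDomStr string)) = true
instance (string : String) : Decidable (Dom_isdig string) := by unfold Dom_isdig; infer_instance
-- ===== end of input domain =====

-- B replaces split()-plus-per-token-scan with one character-by-character pass keeping a digit
-- buffer flushed at whitespace; objective: simpler (one pass, no intermediate token list).

-- ===== PORT A =====
-- int(num) is only reached with num a nonempty run of ASCII digits, where Python's int never
-- raises; PySem.Int.ofChars? is some there, so the .getD 0 default is never used.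
def isdig (string : String) : List Int :=
  let strList := PySem.Str.split₀ string
  strList.foldl (fun numList item =>
    let a := item.toList
    let num := a.foldl (fun num i => if PySem.Chars.isdigit i then num ++ [i] else num) ([] : List Char)
    if num ≠ [] then numList ++ [(PySem.Int.ofChars? num).getD 0] else numList) []

-- ===== PORT B =====
-- same remark: ofChars? is some whenever the buffer is flushed nonempty.
def isdig_alt (string : String) : List Int :=
  let fin := string.toList.foldl (fun (st : List Int × List Char) c =>
      if PySem.Chars.isdigit c then (st.1, st.2 ++ [c])
      else if PySem.Chars.isspace c then
        ((if st.2 ≠ [] then st.1 ++ [(PySem.Int.ofChars? st.2).getD 0] else st.1), ([] : List Char))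
      else st) ([], [])
  if fin.2 ≠ [] then fin.1 ++ [(PySem.Int.ofChars? fin.2).getD 0] else fin.1

-- ===== PRECONDITION & SPEC =====
def Spec_isdig (string : String) (out : List Int) : Prop := out = isdig_alt string
instance (string : String) (out : List Int) : Decidable (Spec_isdig string out) := by unfold Spec_isdig; infer_instance

-- ===== CLAIM (what is proved, stated in full; the proofs are below) =====
def Claim_equal_isdig : Prop := ∀ (string : String), Dom_isdig string → Spec_isdig string (isdig string)

-- ===== LEMMAS AND PROOFS =====

-- flush the digit buffer (the shared 'if num != "": append int(num)' step)
def pvFlush (acc : List Int) (num : List Char) : List Int :=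
  if num ≠ [] then acc ++ [(PySem.Int.ofChars? num).getD 0] else acc

-- A's inner loop: digits of a token, in order
def pvDig (cs : List Char) : List Char :=
  cs.foldl (fun num i => if PySem.Chars.isdigit i then num ++ [i] else num) []

-- A's outer loop over a token list
def pvA (toks : List (List Char)) (acc : List Int) : List Int :=
  toks.foldl (fun numList t => pvFlush numList (pvDig t)) acc

-- B's scan from an arbitrary state
def pvB (cs : List Char) (acc : List Int) (num : List Char) : List Int :=
  let fin := cs.foldl (fun (st : List Int × List Char) c =>
      if PySem.Chars.isdigit c then (st.1, st.2 ++ [c])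
      else if PySem.Chars.isspace c then
        ((if st.2 ≠ [] then st.1 ++ [(PySem.Int.ofChars? st.2).getD 0] else st.1), ([] : List Char))
      else st) (acc, num)
  if fin.2 ≠ [] then fin.1 ++ [(PySem.Int.ofChars? fin.2).getD 0] else fin.1

lemma isdig_alt_eq (s : String) : isdig_alt s = pvB s.toList [] [] := rfl

lemma pvB_cons (c : Char) (cs : List Char) (acc : List Int) (num : List Char) :
    pvB (c :: cs) acc num =
      if PySem.Chars.isdigit c then pvB cs acc (num ++ [c])
      else if PySem.Chars.isspace c then pvB cs (pvFlush acc num) []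
      else pvB cs acc num := by
  simp only [pvB, List.foldl_cons, pvFlush]
  split_ifs <;> rfl

lemma pvB_nil (acc : List Int) (num : List Char) : pvB [] acc num = pvFlush acc num := rfl

lemma pvDig_append (cs : List Char) (c : Char) :
    pvDig (cs ++ [c]) = if PySem.Chars.isdigit c then pvDig cs ++ [c] else pvDig cs := by
  simp only [pvDig, List.foldl_append, List.foldl_cons, List.foldl_nil]

lemma digit_not_space (c : Char) (h : PySem.Chars.isdigit c = true) :
    PySem.Chars.isspace c = false := by
  simp only [PySem.Chars.isdigit, Bool.and_eq_true, decide_eq_true_eq, Char.le_def,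
    UInt32.le_iff_toNat_le] at h
  have h0 : ('0' : Char).val.toNat = 48 := rfl
  have h9 : ('9' : Char).val.toNat = 57 := rfl
  have hc : c.val.toNat = c.toNat := rfl
  rw [h0, h9, hc] at h
  simp [PySem.Chars.isspace]
  omega

lemma go_acc (cs cur : List Char) (acc : List (List Char)) :
    PySem.Chars.split₀.go cs cur acc = acc.reverse ++ PySem.Chars.split₀.go cs cur [] := by
  induction cs generalizing cur acc with
  | nil =>
    rw [PySem.Chars.split₀.go, PySem.Chars.split₀.go]
    split_ifs <;> simp
  | cons c rest ih =>
    rw [PySem.Chars.split₀.go]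
    conv_rhs => rw [PySem.Chars.split₀.go]
    split_ifs with hs he
    · exact ih [] acc
    · rw [ih [] (cur.reverse :: acc), ih [] [cur.reverse]]
      simp
    · exact ih (c :: cur) acc

lemma pvA_append (t : List Char) (ts : List (List Char)) (acc : List Int) :
    pvA (t :: ts) acc = pvA ts (pvFlush acc (pvDig t)) := rfl

-- main invariant: B's scan from buffer = digits of the partial token equals A's
-- processing of the remaining tokens produced by split₀.go
lemma main_inv (cs : List Char) : ∀ (cur : List Char) (acc : List Int),
    pvB cs acc (pvDig cur.reverse) = pvA (PySem.Chars.split₀.go cs cur []) acc := by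
  induction cs with
  | nil =>
    intro cur acc
    rw [PySem.Chars.split₀.go, pvB_nil]
    split_ifs with he
    · simp at he
      subst he
      rfl
    · rfl
  | cons c rest ih =>
    intro cur acc
    rw [PySem.Chars.split₀.go, pvB_cons]
    by_cases hd : PySem.Chars.isdigit c = true
    · rw [if_pos hd, digit_not_space c hd, if_neg (by simp)]
      have : pvDig cur.reverse ++ [c] = pvDig ((c :: cur).reverse) := by
        simp [pvDig_append, hd]
      rw [this]
      exact ih (c :: cur) acc
    · rw [if_neg hd]
      by_cases hs : PySem.Chars.isspace c = true
      · rw [if_pos hs, hs, if_pos rfl]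
        by_cases he : cur.isEmpty = true
        · rw [if_pos he]
          simp at he
          subst he
          have := ih [] (pvFlush acc (pvDig ([] : List Char).reverse))
          simpa [pvDig] using this
        · rw [if_neg he, go_acc rest [] [cur.reverse]]
          simp only [List.reverse_cons, List.reverse_nil, List.nil_append, List.singleton_append,
            pvA_append]
          have := ih [] (pvFlush acc (pvDig cur.reverse))
          simpa [pvDig] using this
      · simp only [if_neg hs]
        have : pvDig cur.reverse = pvDig ((c :: cur).reverse) := by
          simp [pvDig_append, hd]
        rw [this]
        exact ih (c :: cur) acc

lemma isdig_eq (s : String) :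
    isdig s = pvA (PySem.Chars.split₀ s.toList) [] := by
  simp only [isdig, PySem.Str.split₀, pvA, pvFlush, pvDig, List.foldl_map, String.toList_ofList]

-- ===== VERDICT (by name: the statement is the Claim_ definition above) =====
theorem isdig_spec : Claim_equal_isdig := by
  intro s _
  unfold Spec_isdig
  rw [isdig_eq, isdig_alt_eq, PySem.Chars.split₀]
  have := main_inv s.toList [] []
  simpa [pvDig] using this.symm
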